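-- pv_equiv track=rewrite | github.com/SKom-Journey/ner-training-module | template-based/utils/find_entity_indices.py | find_entity_indices
-- ===== SOURCE A (Python) =====
-- def find_entity_indices(sentence, entity):
--     words = sentence.split()  # Split sentence into words
--     current_pos = 0
--     for word in words:
--         # Check if the word matches the entity
--         if word == entity:
--             start_idx = current_pos
--             end_idx = start_idx + len(entity)
--             return start_idx, end_idx
--         # Add the length of the word and a space (for the next word's position)
--         current_pos += len(word) + 1  # 1 is for the space
--     return -1, -1  # Return invalid indices if not found
-- ===== SOURCE B (Python) =====
-- def find_entity_indices(sentence, entity):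
--     words = sentence.split()
--     try:
--         i = words.index(entity)
--     except ValueError:
--         return -1, -1
--     start = sum(len(w) + 1 for w in words[:i])
--     return start, start + len(entity)
-- ===== Notes on version B (the rewrite author's own statement) =====
-- stated objective: alternative
-- what changed: Replaces the single accumulate-and-compare loop with a two-phase decomposition: locate the first matching word with list.index (ValueError -> (-1,-1)), then compute the character offset as a separate prefix sum over the preceding words.
import Mathlib
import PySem

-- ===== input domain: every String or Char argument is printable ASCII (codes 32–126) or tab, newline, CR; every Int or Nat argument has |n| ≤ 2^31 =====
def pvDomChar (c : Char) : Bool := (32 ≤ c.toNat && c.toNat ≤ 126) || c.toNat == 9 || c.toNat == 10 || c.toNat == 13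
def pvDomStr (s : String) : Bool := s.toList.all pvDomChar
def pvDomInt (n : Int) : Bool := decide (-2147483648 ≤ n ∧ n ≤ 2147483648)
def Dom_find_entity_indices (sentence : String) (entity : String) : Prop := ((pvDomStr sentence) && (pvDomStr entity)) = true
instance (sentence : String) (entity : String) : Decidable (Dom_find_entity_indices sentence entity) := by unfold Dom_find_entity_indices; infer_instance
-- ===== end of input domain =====

-- B replaces A's single accumulate-and-compare loop with a find-the-index step followed by a
-- separate prefix-sum offset computation (alternative decomposition, same cost).

-- ===== PORT A =====
-- the for-loop over words with accumulator current_pos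
def pvGoA : List String → String → Int → Int × Int
  | [], _, _ => (-1, -1)
  | w :: ws, entity, pos =>
      if w == entity then (pos, pos + PySem.Str.len entity)
      else pvGoA ws entity (pos + PySem.Str.len w + 1)

def find_entity_indices (sentence : String) (entity : String) : Int × Int :=
  pvGoA (PySem.Str.split₀ sentence) entity 0

-- ===== PORT B =====
def find_entity_indices_alt (sentence : String) (entity : String) : Int × Int :=
  let words := PySem.Str.split₀ sentence
  match PySem.List.index? words entity with
  | none => (-1, -1)   -- ValueError branch
  | some i =>
      -- words[:i] with i a nonnegative in-range index is exactly List.take i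
      let start : Int := ((words.take i).map (fun w => PySem.Str.len w + 1)).sum
      (start, start + PySem.Str.len entity)

-- ===== PRECONDITION & SPEC =====
def Spec_find_entity_indices (sentence : String) (entity : String) (out : Int × Int) : Prop := out = find_entity_indices_alt sentence entity
instance (sentence : String) (entity : String) (out : Int × Int) : Decidable (Spec_find_entity_indices sentence entity out) := by unfold Spec_find_entity_indices; infer_instance

-- ===== CLAIM (what is proved, stated in full; the proofs are below) =====
def Claim_equal_find_entity_indices : Prop := ∀ (sentence : String) (entity : String), Dom_find_entity_indices sentence entity → Spec_find_entity_indices sentence entity (find_entity_indices sentence entity)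

-- ===== LEMMAS AND PROOFS =====

theorem pvGoA_eq (ws : List String) (entity : String) (pos : Int) :
    pvGoA ws entity pos =
      match PySem.List.index? ws entity with
      | none => (-1, -1)
      | some i => (pos + ((ws.take i).map (fun w => PySem.Str.len w + 1)).sum,
                   pos + ((ws.take i).map (fun w => PySem.Str.len w + 1)).sum + PySem.Str.len entity) := by
  induction ws generalizing pos with
  | nil => simp [pvGoA, PySem.List.index?]
  | cons w ws ih =>
    by_cases h : w = entity
    · subst h
      rw [PySem.List.index?_cons_self]
      simp [pvGoA]
    · rw [PySem.List.index?_cons_of_ne ws h]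
      simp only [pvGoA, beq_iff_eq, if_neg h, ih]
      cases hi : PySem.List.index? ws entity with
      | none => simp
      | some i =>
        simp only [Option.map_some]
        simp [List.take_succ_cons, List.map_cons, List.sum_cons]
        ring

-- ===== VERDICT (by name: the statement is the Claim_ definition above) =====
theorem find_entity_indices_spec : Claim_equal_find_entity_indices := by
  intro sentence entity _
  unfold Spec_find_entity_indices find_entity_indices find_entity_indices_alt
  rw [pvGoA_eq]
  cases hi : PySem.List.index? (PySem.Str.split₀ sentence) entity with
  | none => simp only [hi]
  | some i => simp only [hi]; simp
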